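-- pv_equiv track=rewrite | github.com/blackjuice/CursoBCC | bcc.py | pega_siglas
-- ===== SOURCE A (Python) =====
-- def pega_siglas(s):
--     '''(str) -> list
--
--     Recebe um string s e retorna uma lista com todas as palavras
--     em s. Todas as letras na palavra serão convertidas para maiúsculas.
--
--     Tudo que está depois de um símbolo '#' em s será ignorado.
--
--     Pré-condição: a função supõe que as palavras no arquivo correspondem
--                   a siglas de disciplinas.
--     '''
--     lista = []  # lista  vazia
--     sigla = ''  # string vazio
--     for c in s:
--         # str.isalnum(): retorna True se todo símbolo em str é uma
--         #               letra ou número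
--         if c.isalnum():
--             sigla += c   # concatena a nova letra
--         elif sigla != '':
--             lista.append(sigla.upper())
--             sigla = ''
--         if c == '#': return lista
--
--     # ponhe, possivelmente, a última sigla na lista
--     if sigla != '':
--         lista.append(sigla.upper())
--
--     return lista
-- ===== SOURCE B (Python) =====
-- from itertools import groupby
--
-- def pega_siglas(s):
--     prefix = s.split('#', 1)[0]
--     return [''.join(g).upper() for k, g in groupby(prefix, key=str.isalnum) if k]
-- ===== Notes on version B (the rewrite author's own statement) =====
-- stated objective: idiomatic
-- what changed: Replaces the char-by-char accumulate/flush state machine with a two-pass formulation: truncate at the first '#' via s.split('#',1)[0], then itertools.groupby on str.isalnum and collect the upper-cased alnum runs; the C-level split/groupby avoid per-character Python bytecode and string concatenation.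
import Mathlib
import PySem

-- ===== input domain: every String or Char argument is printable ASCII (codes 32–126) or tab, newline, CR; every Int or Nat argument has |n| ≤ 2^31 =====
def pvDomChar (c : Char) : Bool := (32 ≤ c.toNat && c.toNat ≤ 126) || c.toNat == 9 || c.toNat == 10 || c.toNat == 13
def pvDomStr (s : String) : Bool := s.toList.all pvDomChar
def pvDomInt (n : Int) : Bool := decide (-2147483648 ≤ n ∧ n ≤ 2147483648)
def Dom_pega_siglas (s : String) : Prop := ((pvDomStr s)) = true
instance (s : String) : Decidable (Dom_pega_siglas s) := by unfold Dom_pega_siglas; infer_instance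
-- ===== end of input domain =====

-- B replaces A's char-by-char accumulate/flush state machine by truncating at the
-- first '#' (split('#',1)[0]) and grouping the prefix by str.isalnum (itertools.groupby);
-- objective: simpler/idiomatic, same cost.

-- ===== PORT A =====
-- the loop 'for c in s' with state (lista, sigla); 'return lista' inside the loop ends the recursion
def pegaA : List Char → List String → List Char → List String
  | [], lista, sigla =>
      if sigla ≠ [] then lista ++ [String.ofList (PySem.Chars.upper sigla)] else lista
  | c :: rest, lista, sigla =>
      let p : List String × List Char :=
        if PySem.Chars.isalnum c then (lista, sigla ++ [c])
        else if sigla ≠ [] then (lista ++ [String.ofList (PySem.Chars.upper sigla)], [])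
        else (lista, sigla)
      if c = '#' then p.1 else pegaA rest p.1 p.2

def pega_siglas (s : String) : List String := pegaA s.toList [] []

-- ===== PORT B =====
-- itertools.groupby(xs, key): maximal runs of equal key, in order (built by structural recursion)
def pyGroupBy (key : Char → Bool) : List Char → List (Bool × List Char)
  | [] => []
  | c :: rest =>
      match pyGroupBy key rest with
      | (k, g) :: gs => if key c = k then (k, c :: g) :: gs else (key c, [c]) :: (k, g) :: gs
      | [] => [(key c, [c])]

-- prefix = s.split('#', 1)[0]  (split with a non-empty separator always yields a first piece);
-- then: [''.join(g).upper() for k, g in groupby(prefix, key=str.isalnum) if k]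
def pega_siglas_alt (s : String) : List String :=
  (pyGroupBy PySem.Chars.isalnum
      ((((PySem.Str.splitMax? s "#" 1).getD [s]).headD s).toList)).filterMap
    (fun kg => if kg.1 then some (String.ofList (PySem.Chars.upper kg.2)) else none)

-- ===== PRECONDITION & SPEC =====
def Spec_pega_siglas (s : String) (out : List String) : Prop := out = pega_siglas_alt s
instance (s : String) (out : List String) : Decidable (Spec_pega_siglas s out) := by unfold Spec_pega_siglas; infer_instance

-- ===== CLAIM (what is proved, stated in full; the proofs are below) =====
def Claim_equal_pega_siglas : Prop := ∀ (s : String), Dom_pega_siglas s → Spec_pega_siglas s (pega_siglas s)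

-- ===== LEMMAS AND PROOFS =====

theorem pyGroupBy_nil (key : Char → Bool) : pyGroupBy key [] = [] := rfl

theorem pyGroupBy_cons (key : Char → Bool) (c : Char) (l : List Char) :
    pyGroupBy key (c :: l) =
      match pyGroupBy key l with
      | (k, g) :: gs => if key c = k then (k, c :: g) :: gs else (key c, [c]) :: (k, g) :: gs
      | [] => [(key c, [c])] := rfl

-- the comprehension's filter-and-upper over a group list
def pvCollect (gs : List (Bool × List Char)) : List String :=
  gs.filterMap (fun kg => if kg.1 then some (String.ofList (PySem.Chars.upper kg.2)) else none)

-- a pending (alnum) accumulator 'sigla' merges into the front of the remaining groups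
def pvMerge (sigla : List Char) (gs : List (Bool × List Char)) : List (Bool × List Char) :=
  if sigla = [] then gs else
    match gs with
    | (true, g) :: rest => (true, sigla ++ g) :: rest
    | _ => (true, sigla) :: gs

theorem pegaA_eq (l : List Char) : ∀ (lista : List String) (sigla : List Char),
    pegaA l lista sigla =
      lista ++ pvCollect (pvMerge sigla (pyGroupBy PySem.Chars.isalnum (l.takeWhile (· ≠ '#')))) := by
  induction l with
  | nil =>
      intro lista sigla
      by_cases h : sigla = [] <;>
        simp [pegaA, pvMerge, pvCollect, pyGroupBy_nil, h]
  | cons c rest ih =>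
      intro lista sigla
      by_cases hc : c = '#'
      · subst hc
        have halnum : PySem.Chars.isalnum '#' = false := by decide
        by_cases h : sigla = [] <;>
          simp [pegaA, pvMerge, pvCollect, pyGroupBy_nil, h, halnum, List.takeWhile]
      · rw [show (c :: rest).takeWhile (· ≠ '#') = c :: rest.takeWhile (· ≠ '#') by
            simp [List.takeWhile, hc]]
        rw [pyGroupBy_cons]
        rcases hg : pyGroupBy PySem.Chars.isalnum (rest.takeWhile (· ≠ '#')) with _ | ⟨⟨k, g⟩, gs⟩
        all_goals by_cases ha : PySem.Chars.isalnum c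
        · rw [show pegaA (c :: rest) lista sigla = pegaA rest lista (sigla ++ [c]) by
              simp [pegaA, ha, hc]]
          rw [ih, hg]
          by_cases h : sigla = [] <;> simp [pvMerge, pvCollect, h, ha]
        · rw [show pegaA (c :: rest) lista sigla =
              pegaA rest (if sigla ≠ [] then lista ++ [String.ofList (PySem.Chars.upper sigla)] else lista) [] by
              by_cases h : sigla = [] <;> simp [pegaA, ha, hc, h]]
          rw [ih, hg]
          rw [Bool.not_eq_true] at ha
          by_cases h : sigla = [] <;> simp [pvMerge, pvCollect, h, ha]
        · rw [show pegaA (c :: rest) lista sigla = pegaA rest lista (sigla ++ [c]) by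
              simp [pegaA, ha, hc]]
          rw [ih, hg]
          cases k <;> by_cases h : sigla = [] <;>
            simp [pvMerge, pvCollect, ha, h]
        · rw [show pegaA (c :: rest) lista sigla =
              pegaA rest (if sigla ≠ [] then lista ++ [String.ofList (PySem.Chars.upper sigla)] else lista) [] by
              by_cases h : sigla = [] <;> simp [pegaA, ha, hc, h]]
          rw [ih, hg]
          rw [Bool.not_eq_true] at ha
          cases k <;> by_cases h : sigla = [] <;>
            simp [pvMerge, pvCollect, ha, h]

-- splitOnMax.go with maxsplit exhausted returns the rest as one piece
theorem go_zero (fuel : Nat) (l cur : List Char) (acc : List (List Char)) :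
    PySem.Chars.splitOnMax.go ['#'] fuel 0 l cur acc = ((cur.reverse ++ l) :: acc).reverse := by
  cases fuel <;> cases l <;> simp [PySem.Chars.splitOnMax.go]

-- with maxsplit = 1 and enough fuel, the first piece is the prefix before the first '#'
theorem go_head : ∀ (fuel : Nat) (l cur : List Char), l.length < fuel →
    ∃ tl, PySem.Chars.splitOnMax.go ['#'] fuel 1 l cur [] =
      (cur.reverse ++ l.takeWhile (· ≠ '#')) :: tl := by
  intro fuel
  induction fuel with
  | zero => intro l cur h; omega
  | succ f ih =>
      intro l cur h
      cases l with
      | nil => exact ⟨[], by simp [PySem.Chars.splitOnMax.go]⟩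
      | cons c rest =>
          by_cases hc : c = '#'
          · subst hc
            refine ⟨[rest], ?_⟩
            rw [show PySem.Chars.splitOnMax.go ['#'] (f + 1) 1 ('#' :: rest) cur [] =
                PySem.Chars.splitOnMax.go ['#'] f 0 rest [] [cur.reverse] by
                simp [PySem.Chars.splitOnMax.go, List.isPrefixOf]]
            rw [go_zero]
            simp [List.takeWhile]
          · obtain ⟨tl, htl⟩ := ih rest (c :: cur) (by simp at h; omega)
            refine ⟨tl, ?_⟩
            rw [show PySem.Chars.splitOnMax.go ['#'] (f + 1) 1 (c :: rest) cur [] =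
                PySem.Chars.splitOnMax.go ['#'] f 1 rest (c :: cur) [] by
                simp [PySem.Chars.splitOnMax.go, List.isPrefixOf, (by simpa using Ne.symm hc : ('#' == c) = false)]]
            rw [htl]
            simp [List.takeWhile, hc]

theorem splitHead (s : String) :
    (((PySem.Str.splitMax? s "#" 1).getD [s]).headD s).toList = s.toList.takeWhile (· ≠ '#') := by
  obtain ⟨tl, htl⟩ := go_head (s.toList.length + 1) s.toList [] (by omega)
  have hsplit : PySem.Chars.splitMax? s.toList ['#'] 1 =
      some ((s.toList.takeWhile (· ≠ '#')) :: tl) := by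
    simp only [PySem.Chars.splitMax?, PySem.Chars.splitOnMax]
    norm_num
    simpa using htl
  have hmap := PySem.Str.splitMax?_map s "#" 1
  rw [show ("#" : String).toList = ['#'] from rfl, hsplit] at hmap
  rcases ho : PySem.Str.splitMax? s "#" 1 with _ | ps
  · rw [ho] at hmap; simp at hmap
  · rw [ho] at hmap
    simp only [Option.map_some, Option.some.injEq] at hmap
    cases ps with
    | nil => simp at hmap
    | cons p ptl =>
        simp only [List.map_cons, List.cons.injEq] at hmap
        simpa using hmap.1

-- ===== VERDICT (by name: the statement is the Claim_ definition above) =====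
theorem pega_siglas_spec : Claim_equal_pega_siglas := by
  intro s _
  unfold Spec_pega_siglas pega_siglas pega_siglas_alt
  rw [pegaA_eq, splitHead]
  simp [pvMerge, pvCollect]
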